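-- pv_equiv track=rewrite | github.com/DeepShield-AI/DeepTrace | agent/src/trace/ebpf/src/protocols/tests/redis/parse_pcap.py | json_parse_hook
-- ===== SOURCE A (Python) =====
-- def json_parse_hook(lst):
--     result = {}
--     count = {}
--     for key, val in lst:
--         if key in count: count[key] += 1
--         else: count[key] = 1
--         if key == 'resp.bulk_string' and key in result:
--             pass
--         else:
--             result[key] = val
--
--     return result
-- ===== SOURCE B (Python) =====
-- def json_parse_hook(lst):
--     result = dict(lst)
--     for key, val in lst:
--         if key == 'resp.bulk_string':
--             result[key] = val
--             break
--     return result
-- ===== Notes on version B (the rewrite author's own statement) =====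
-- stated objective: simpler
-- what changed: Replaces A's single branchy loop (with a dead count dict) by the dict(lst) constructor (last value wins for every key) followed by a short break-loop that restores the FIRST value for the one special key 'resp.bulk_string'.
import Mathlib
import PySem

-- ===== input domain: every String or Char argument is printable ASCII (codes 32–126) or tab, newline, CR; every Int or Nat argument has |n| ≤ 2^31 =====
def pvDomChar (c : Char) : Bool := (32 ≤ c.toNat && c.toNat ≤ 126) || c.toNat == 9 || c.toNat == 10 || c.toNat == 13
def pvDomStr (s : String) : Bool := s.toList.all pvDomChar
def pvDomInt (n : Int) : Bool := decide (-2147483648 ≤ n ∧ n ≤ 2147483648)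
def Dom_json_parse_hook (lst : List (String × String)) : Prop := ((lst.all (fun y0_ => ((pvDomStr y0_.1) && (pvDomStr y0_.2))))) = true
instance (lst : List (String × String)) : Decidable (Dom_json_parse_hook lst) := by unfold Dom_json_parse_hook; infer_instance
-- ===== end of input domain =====

-- B replaces A's single branchy loop (and its dead count dict) by dict(lst) (last value
-- wins) plus a short break-loop restoring the first 'resp.bulk_string' value: simpler.

-- ===== PORT A =====
-- one iteration of A's loop body over the state (result, count)
def pvAStep (st : PySem.Dict String String × PySem.Dict String Int)
    (p : String × String) : PySem.Dict String String × PySem.Dict String Int :=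
  let count := if st.2.contains p.1 then st.2.modify p.1 0 (· + 1) else st.2.insert p.1 1
  let result := if p.1 == "resp.bulk_string" && st.1.contains p.1 then st.1
                else st.1.insert p.1 p.2
  (result, count)

def json_parse_hook (lst : List (String × String)) : List (String × String) :=
  ((lst.foldl pvAStep (PySem.Dict.empty, PySem.Dict.empty)).1).items

-- ===== PORT B =====
-- B's second loop: first pair with key 'resp.bulk_string' overwrites, then break
def pvBFix (d : PySem.Dict String String) : List (String × String) → PySem.Dict String String
  | [] => d
  | (k, v) :: t => if k == "resp.bulk_string" then d.insert k v else pvBFix d t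

def json_parse_hook_alt (lst : List (String × String)) : List (String × String) :=
  (pvBFix (PySem.Dict.ofList lst) lst).items

-- ===== PRECONDITION & SPEC =====
def Spec_json_parse_hook (lst : List (String × String)) (out : List (String × String)) : Prop := out = json_parse_hook_alt lst
instance (lst : List (String × String)) (out : List (String × String)) : Decidable (Spec_json_parse_hook lst out) := by unfold Spec_json_parse_hook; infer_instance

-- ===== CLAIM (what is proved, stated in full; the proofs are below) =====
def Claim_equal_json_parse_hook : Prop := ∀ (lst : List (String × String)), Dom_json_parse_hook lst → Spec_json_parse_hook lst (json_parse_hook lst)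

-- ===== LEMMAS AND PROOFS =====

-- the plain 'result[key] = val' insertion step (B's dict(lst) pass is its fold)
def pvIns (d : PySem.Dict String String) (p : String × String) : PySem.Dict String String :=
  d.insert p.1 p.2

theorem pvOfList_eq_foldl (lst : List (String × String)) :
    PySem.Dict.ofList lst = lst.foldl pvIns PySem.Dict.empty := rfl

-- two inserts at distinct keys commute when the first key is already present
theorem pvInsert_comm_of_contains (d : PySem.Dict String String) {k k' : String}
    (v v' : String) (hne : k' ≠ k) (hc : d.contains k = true) :
    (d.insert k v).insert k' v' = (d.insert k' v').insert k v := by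
  apply PySem.Dict.ext
  by_cases hc' : d.contains k' = true
  · have h1 : (d.insert k v).contains k' = true := by
      simp [PySem.Dict.contains_insert, hc']
    have h2 : (d.insert k' v').contains k = true := by
      simp [PySem.Dict.contains_insert, hc]
    rw [PySem.Dict.items_insert_of_contains _ _ h1,
        PySem.Dict.items_insert_of_contains _ _ hc,
        PySem.Dict.items_insert_of_contains _ _ h2,
        PySem.Dict.items_insert_of_contains _ _ hc',
        List.map_map, List.map_map]
    apply List.map_congr_left
    intro p _
    by_cases hk : p.1 = k
    · simp [hk, Ne.symm hne]
    · by_cases hk' : p.1 = k' <;> simp [hk, hk', hne]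
  · have hcf : d.contains k' = false := by simpa using hc'
    have h1 : (d.insert k v).contains k' = false := by
      simp [PySem.Dict.contains_insert, hcf, hne]
    have h2 : (d.insert k' v').contains k = true := by
      simp [PySem.Dict.contains_insert, hc]
    rw [PySem.Dict.items_insert_of_not_contains _ _ h1,
        PySem.Dict.items_insert_of_contains _ _ hc,
        PySem.Dict.items_insert_of_contains _ _ h2,
        PySem.Dict.items_insert_of_not_contains _ _ hcf,
        List.map_append]
    simp
    intro hk
    exact absurd hk hne

-- inserting at an already-present key, then folding, then overwriting it = never inserting
theorem pvFoldl_insert_overwrite (t : List (String × String)) :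
    ∀ (d : PySem.Dict String String) (v w : String),
      d.contains "resp.bulk_string" = true →
      ((t.foldl pvIns (d.insert "resp.bulk_string" v)).insert "resp.bulk_string" w) =
        ((t.foldl pvIns d).insert "resp.bulk_string" w) := by
  induction t with
  | nil => intro d v w _; simp [PySem.Dict.insert_insert_self]
  | cons p t ih =>
    intro d v w hc
    by_cases hp : p.1 = "resp.bulk_string"
    · simp only [List.foldl_cons, pvIns, hp, PySem.Dict.insert_insert_self]
    · simp only [List.foldl_cons, pvIns,
        pvInsert_comm_of_contains d _ _ hp hc]
      exact ih (d.insert p.1 p.2) v w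
        (by simp [PySem.Dict.contains_insert, hc])

-- inserting an already-present value changes nothing (needs unique keys)
theorem pvInsert_get?_self (d : PySem.Dict String String) (k w : String)
    (hnd : d.keys.Nodup) (h : d.get? k = some w) : d.insert k w = d := by
  apply PySem.Dict.ext
  have hc : d.contains k = true := by
    rw [PySem.Dict.contains_eq_isSome_get?, h]; rfl
  rw [PySem.Dict.items_insert_of_contains _ _ hc]
  conv_rhs => rw [← List.map_id d.items]
  apply List.map_congr_left
  intro p hp
  obtain ⟨a, b⟩ := p
  by_cases hk : a = k
  · have hget : d.get? a = some b := PySem.Dict.get?_of_mem_items d hp hnd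
    rw [hk, h] at hget
    have hb : b = w := by simpa using hget.symm
    simp [hk, hb]
  · simp [hk]

-- once 'resp.bulk_string' is in result with value w, A keeps w and otherwise
-- behaves like plain insertion; the final dict is the plain fold with K forced to w
theorem pvA_of_contains (t : List (String × String)) :
    ∀ (d : PySem.Dict String String) (c : PySem.Dict String Int) (w : String),
      d.keys.Nodup → d.get? "resp.bulk_string" = some w →
      (t.foldl pvAStep (d, c)).1 = (t.foldl pvIns d).insert "resp.bulk_string" w := by
  induction t with
  | nil =>
    intro d c w hnd h
    exact (pvInsert_get?_self d _ w hnd h).symm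
  | cons p t ih =>
    intro d c w hnd h
    have hc : d.contains "resp.bulk_string" = true := by
      rw [PySem.Dict.contains_eq_isSome_get?, h]; rfl
    by_cases hp : p.1 = "resp.bulk_string"
    · have hstep : (pvAStep (d, c) p).1 = d := by
        simp [pvAStep, hp, hc]
      simp only [List.foldl_cons]
      have hfst : pvAStep (d, c) p = (d, (pvAStep (d, c) p).2) := by
        cases hq : pvAStep (d, c) p
        simp_all
      rw [hfst, ih d _ w hnd h]
      have hins : pvIns d p = d.insert "resp.bulk_string" p.2 := by simp [pvIns, hp]
      rw [hins]
      exact (pvFoldl_insert_overwrite t d p.2 w hc).symm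
    · have hstep : (pvAStep (d, c) p).1 = d.insert p.1 p.2 := by
        simp [pvAStep, hp]
      simp only [List.foldl_cons]
      have hfst : pvAStep (d, c) p = (d.insert p.1 p.2, (pvAStep (d, c) p).2) := by
        cases hq : pvAStep (d, c) p
        simp_all
      rw [hfst]
      exact ih (d.insert p.1 p.2) _ w
        (PySem.Dict.nodup_keys_insert _ _ _ hnd)
        (by rw [PySem.Dict.get?_insert_of_ne _ _ (Ne.symm hp)]; exact h)

-- before 'resp.bulk_string' appears, A = plain fold followed by B's fix-up scan
theorem pvA_of_not_contains (t : List (String × String)) :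
    ∀ (d : PySem.Dict String String) (c : PySem.Dict String Int),
      d.keys.Nodup → d.contains "resp.bulk_string" = false →
      (t.foldl pvAStep (d, c)).1 = pvBFix (t.foldl pvIns d) t := by
  induction t with
  | nil => intro d c _ _; rfl
  | cons p t ih =>
    intro d c hnd hc
    obtain ⟨k, v⟩ := p
    by_cases hp : k = "resp.bulk_string"
    · have hstep : (pvAStep (d, c) (k, v)).1 = d.insert k v := by
        simp [pvAStep, hp, hc]
      simp only [List.foldl_cons]
      have hfst : pvAStep (d, c) (k, v) = (d.insert k v, (pvAStep (d, c) (k, v)).2) := by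
        cases hq : pvAStep (d, c) (k, v)
        simp_all
      rw [hfst, pvA_of_contains t (d.insert k v) _ v
        (PySem.Dict.nodup_keys_insert _ _ _ hnd)
        (by rw [hp]; exact PySem.Dict.get?_insert_self _ _ _)]
      simp [pvBFix, pvIns, hp]
    · have hstep : (pvAStep (d, c) (k, v)).1 = d.insert k v := by
        simp [pvAStep, hp]
      simp only [List.foldl_cons]
      have hfst : pvAStep (d, c) (k, v) = (d.insert k v, (pvAStep (d, c) (k, v)).2) := by
        cases hq : pvAStep (d, c) (k, v)
        simp_all
      rw [hfst, ih (d.insert k v) _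
        (PySem.Dict.nodup_keys_insert _ _ _ hnd)
        (by simp [PySem.Dict.contains_insert, hc]; exact Ne.symm hp)]
      simp [pvBFix, pvIns, hp]

-- ===== VERDICT (by name: the statement is the Claim_ definition above) =====
theorem json_parse_hook_spec : Claim_equal_json_parse_hook := by
  intro lst _
  unfold Spec_json_parse_hook json_parse_hook json_parse_hook_alt
  rw [pvOfList_eq_foldl,
    pvA_of_not_contains lst PySem.Dict.empty PySem.Dict.empty
      (by simp [PySem.Dict.keys_empty]) (PySem.Dict.contains_empty _)]
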